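-- pv_equiv track=rewrite | github.com/JohnScolaro/active-statistics | backend/active_statistics/statistics/plots/pace_timeline.py | get_list_of_falses_with_one_true
-- ===== SOURCE A (Python) =====
-- def get_list_of_falses_with_one_true(len_list: int, index_of_true: int) -> list[bool]:
--     """
--     Helper to get a list like: [False, True, False, False] for parameters of (4, 1).
--     Used to get visibility of buttons.
--     """
--     a = []
--     for i in range(len_list):
--         if i == index_of_true:
--             a.append(True)
--         else:
--             a.append(False)
--     return a
-- ===== SOURCE B (Python) =====
-- def get_list_of_falses_with_one_true(len_list: int, index_of_true: int) -> list[bool]: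
--     result = [False] * len_list
--     if 0 <= index_of_true < len_list:
--         result[index_of_true] = True
--     return result
-- ===== Notes on version B (the rewrite author's own statement) =====
-- stated objective: simpler
-- what changed: A's per-element loop with an equality branch is replaced by one bulk allocation of Falses plus a single guarded assignment at the index.
import Mathlib
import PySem

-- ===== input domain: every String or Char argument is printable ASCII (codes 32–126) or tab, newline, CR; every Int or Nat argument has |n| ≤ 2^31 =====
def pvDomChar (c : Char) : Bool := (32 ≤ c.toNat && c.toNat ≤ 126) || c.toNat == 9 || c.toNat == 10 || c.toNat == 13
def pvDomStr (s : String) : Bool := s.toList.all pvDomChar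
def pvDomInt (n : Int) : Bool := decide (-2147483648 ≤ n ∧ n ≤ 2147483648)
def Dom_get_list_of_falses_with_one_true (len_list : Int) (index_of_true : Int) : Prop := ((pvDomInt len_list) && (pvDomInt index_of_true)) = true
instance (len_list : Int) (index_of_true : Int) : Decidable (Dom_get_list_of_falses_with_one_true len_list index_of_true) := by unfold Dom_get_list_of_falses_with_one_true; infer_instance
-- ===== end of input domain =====

-- ===== PORT A =====
-- a = []; for i in range(len_list): a.append(True if i == index_of_true else False)
def get_list_of_falses_with_one_true (len_list : Int) (index_of_true : Int) : List Bool :=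
  (PySem.List.pyRange 0 len_list 1).foldl
    (fun a i => if i = index_of_true then a ++ [true] else a ++ [false]) []

-- ===== PORT B =====
-- B: bulk allocation [False] * len_list, then one guarded assignment at index_of_true
def get_list_of_falses_with_one_true_alt (len_list : Int) (index_of_true : Int) : List Bool :=
  let result := List.replicate len_list.toNat false
  if 0 ≤ index_of_true ∧ index_of_true < len_list then
    result.set index_of_true.toNat true
  else
    result

-- ===== PRECONDITION & SPEC =====
def Spec_get_list_of_falses_with_one_true (len_list : Int) (index_of_true : Int) (out : List Bool) : Prop := out = get_list_of_falses_with_one_true_alt len_list index_of_true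
instance (len_list : Int) (index_of_true : Int) (out : List Bool) : Decidable (Spec_get_list_of_falses_with_one_true len_list index_of_true out) := by unfold Spec_get_list_of_falses_with_one_true; infer_instance

-- ===== CLAIM (what is proved, stated in full; the proofs are below) =====
def Claim_equal_get_list_of_falses_with_one_true : Prop := ∀ (len_list : Int) (index_of_true : Int), Dom_get_list_of_falses_with_one_true len_list index_of_true → Spec_get_list_of_falses_with_one_true len_list index_of_true (get_list_of_falses_with_one_true len_list index_of_true)

-- ===== LEMMAS AND PROOFS =====

-- A's loop appends one Bool per range element: it is the map of the branch over the range.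
theorem foldl_append_bool (t : Int) (l : List Int) (acc : List Bool) :
    l.foldl (fun a i => if i = t then a ++ [true] else a ++ [false]) acc
      = acc ++ l.map (fun i => decide (i = t)) := by
  induction l generalizing acc with
  | nil => simp
  | cons x xs ih =>
    simp only [List.foldl_cons, List.map_cons, ih]
    split_ifs with h <;> simp [h]

theorem get_list_of_falses_with_one_true_spec : Claim_equal_get_list_of_falses_with_one_true := by
  intro n t _
  unfold Spec_get_list_of_falses_with_one_true
  unfold get_list_of_falses_with_one_true get_list_of_falses_with_one_true_alt
  rw [foldl_append_bool, PySem.List.pyRange_one]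
  simp only [List.nil_append, List.map_map]
  apply List.ext_getElem
  · split_ifs <;> simp
  · intro k hk hk'
    simp only [List.getElem_map, List.getElem_range, Function.comp_apply, zero_add]
    split_ifs with h
    · rw [List.getElem_set]
      split_ifs with he <;> simp_all <;> omega
    · simp only [List.getElem_replicate]
      simp only [List.length_map, List.length_range] at hk
      simp only [decide_eq_false_iff_not]
      omega
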